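-- pv_equiv track=rewrite | github.com/AustralianCyberSecurityCentre/azul-plugin-repeated-bytes | azul_plugin_repeated_bytes/repeated_bytes.py | data_repeats_exactly_n_times
-- ===== SOURCE A (Python) =====
-- def data_repeats_exactly_n_times(data, n):
--     """Return whether the data is a pattern repeated n times (iterative).
--
--     Naively checks that the given data is composed of <n> identical blocks by
--     comparing them all against the first one.
--     """
--     # We can immediately return False if the length if not perfectly divisible
--     # by <n>. (We probably won't ever call this function with such data though).
--     if len(data) % n != 0:
--         return False
--
--     # Compute the size of the repeating chunk, then compare each subsequent
--     # chunk of this size against the first one. We can fail as soon as we find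
--     # non-matching data.
--     chunksize = int(len(data) / n)
--     for i in range(1, n):
--         if data[:chunksize] != data[chunksize * i : chunksize * (i + 1)]:
--             return False
--
--     # All chunks were found to be equal.
--     return True
-- ===== SOURCE B (Python) =====
-- def data_repeats_exactly_n_times(data, n):
--     """Return whether the data is a pattern repeated n times (reconstruct-and-compare).
--
--     Rebuild the expected value from the first chunk in one shot and compare it
--     with the data, instead of scanning chunk by chunk.
--     """
--     if len(data) % n != 0:
--         return False
--     if n <= 1:
--         # One repetition (or fewer) imposes nothing beyond divisibility.
--         return True
--     chunksize = len(data) // n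
--     return data[:chunksize] * n == data
-- ===== Notes on version B (the rewrite author's own statement) =====
-- stated objective: simpler
-- what changed: Replaces the indexed loop comparing every chunk against the first with a single reconstruct-and-compare: build data[:chunksize] * n once and test equality with data (n <= 1 needs no scan at all).
import Mathlib
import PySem

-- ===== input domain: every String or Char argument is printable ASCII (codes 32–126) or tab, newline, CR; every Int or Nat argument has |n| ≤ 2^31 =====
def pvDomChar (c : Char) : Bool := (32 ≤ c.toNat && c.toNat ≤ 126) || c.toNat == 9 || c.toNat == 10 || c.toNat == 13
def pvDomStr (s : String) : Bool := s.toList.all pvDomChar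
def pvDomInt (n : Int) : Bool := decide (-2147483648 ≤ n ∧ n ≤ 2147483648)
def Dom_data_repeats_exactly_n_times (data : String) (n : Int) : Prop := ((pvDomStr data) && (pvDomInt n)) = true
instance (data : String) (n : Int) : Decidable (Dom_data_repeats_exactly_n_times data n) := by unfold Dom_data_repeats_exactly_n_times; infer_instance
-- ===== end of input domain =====

-- B replaces A's chunk-by-chunk comparison loop with a single reconstruct-and-compare
-- (data[:chunksize] * n == data); objective: simpler. Same cost.

-- ===== PORT A =====
-- A: early False on non-divisible length, then compare each chunk i = 1..n-1 with the first.
def data_repeats_exactly_n_times (data : String) (n : Int) : Bool :=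
  let l : Int := (data.toList.length : Int)
  if PySem.Int.mod l n ≠ 0 then false
  else
    -- int(len(data)/n) ported as PySem.Int.truncdiv (exact for |len|,|n| < 2^53)
    let chunksize := PySem.Int.truncdiv l n
    (PySem.List.pyRange 1 n 1).all (fun i =>
      PySem.List.slice data.toList none (some chunksize) ==
        PySem.List.slice data.toList (some (chunksize * i)) (some (chunksize * (i + 1))))

-- ===== PORT B =====
-- B: divisibility check, trivial n ≤ 1, then data[:chunksize] * n == data.
def data_repeats_exactly_n_times_alt (data : String) (n : Int) : Bool :=
  let l : Int := (data.toList.length : Int)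
  if PySem.Int.mod l n ≠ 0 then false
  else if n ≤ 1 then true
  else
    let chunksize := PySem.Int.floordiv l n
    (List.replicate n.toNat (PySem.List.slice data.toList none (some chunksize))).flatten
      == data.toList

-- ===== PRECONDITION & SPEC =====
-- Pre_ excludes exactly n = 0, where Python A raises ZeroDivisionError on 'len(data) % n'.
def Pre_data_repeats_exactly_n_times (data : String) (n : Int) : Prop := n ≠ 0
instance (data : String) (n : Int) : Decidable (Pre_data_repeats_exactly_n_times data n) := by unfold Pre_data_repeats_exactly_n_times; infer_instance
def pvWitness_data_repeats_exactly_n_times : String × Int := ("abab", 2)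

def Spec_data_repeats_exactly_n_times (data : String) (n : Int) (out : Bool) : Prop := out = data_repeats_exactly_n_times_alt data n
instance (data : String) (n : Int) (out : Bool) : Decidable (Spec_data_repeats_exactly_n_times data n out) := by unfold Spec_data_repeats_exactly_n_times; infer_instance

-- ===== CLAIM (what is proved, stated in full; the proofs are below) =====
def Claim_equal_data_repeats_exactly_n_times : Prop := ∀ (data : String) (n : Int), Dom_data_repeats_exactly_n_times data n → Pre_data_repeats_exactly_n_times data n → Spec_data_repeats_exactly_n_times data n (data_repeats_exactly_n_times data n)

-- ===== LEMMAS AND PROOFS =====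

-- Core fact: a list of length c*m is m copies of p (p of length c) iff every chunk equals p.
theorem pv_flatten_replicate_iff {α : Type} (c : Nat) (p : List α) (hp : p.length = c) :
    ∀ (m : Nat) (xs : List α), xs.length = c * m →
      ((List.replicate m p).flatten = xs ↔ ∀ i < m, (xs.drop (c * i)).take c = p) := by
  intro m
  induction m with
  | zero =>
    intro xs hx
    simp only [Nat.mul_zero, List.length_eq_zero_iff] at hx
    subst hx
    simp
  | succ m ih =>
    intro xs hx
    have hc : c ≤ xs.length := by rw [hx]; nlinarith [Nat.zero_le (c * m)]
    have hdrop : (xs.drop c).length = c * m := by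
      rw [List.length_drop, hx]; ring_nf; omega
    constructor
    · intro h i hi
      have hsplit : p ++ (List.replicate m p).flatten = xs := by
        simpa [List.replicate_succ] using h
      have hps : p = xs.take c := by
        have := congrArg (List.take c) hsplit
        rwa [List.take_append_of_le_length (by omega), List.take_of_length_le (by omega)] at this
      have hqs : (List.replicate m p).flatten = xs.drop c := by
        have := congrArg (List.drop c) hsplit
        rwa [List.drop_append_of_le_length (by omega), List.drop_of_length_le (by omega),
          List.nil_append] at this
      cases i with
      | zero => simpa using hps.symm
      | succ j =>
        have hj := (ih (xs.drop c) hdrop).mp hqs j (by omega)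
        rw [List.drop_drop] at hj
        have heq : c + c * j = c * (j + 1) := by ring
        rwa [heq] at hj
    · intro h
      have h0 : xs.take c = p := by simpa using h 0 (by omega)
      have hrest : (List.replicate m p).flatten = xs.drop c := by
        refine (ih (xs.drop c) hdrop).mpr ?_
        intro j hj
        have hj' := h (j + 1) (by omega)
        rw [List.drop_drop]
        have heq : c + c * j = c * (j + 1) := by ring
        rw [heq]
        exact hj'
      calc (List.replicate (m + 1) p).flatten
          = p ++ (List.replicate m p).flatten := by simp [List.replicate_succ]
        _ = xs.take c ++ xs.drop c := by rw [h0, hrest]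
        _ = xs := List.take_append_drop c xs

-- A's slice data[c*j : c*(j+1)] as drop/take, for natural c and j.
theorem pv_slice_chunk {α : Type} (xs : List α) (c j : Nat) :
    PySem.List.slice xs (some ((c : Int) * (j : Int))) (some ((c : Int) * ((j : Int) + 1)))
      = (xs.drop (c * j)).take c := by
  have h1 : (c : Int) * (j : Int) = ((c * j : Nat) : Int) := by push_cast; ring
  have h2 : (c : Int) * ((j : Int) + 1) = ((c * j : Nat) : Int) + ((c : Nat) : Int) := by
    push_cast; ring
  rw [h1, h2, PySem.List.slice_natCast_add]

-- ===== VERDICT (by name: the statement is the Claim_ definition above) =====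
theorem data_repeats_exactly_n_times_spec : Claim_equal_data_repeats_exactly_n_times := by
  intro data n _ hn
  unfold Spec_data_repeats_exactly_n_times
  unfold data_repeats_exactly_n_times data_repeats_exactly_n_times_alt
  set xs := data.toList with hxs
  set l : Int := (xs.length : Int) with hl
  by_cases hmod : PySem.Int.mod l n ≠ 0
  · simp [hmod]
  · rw [not_not] at hmod
    simp only [hmod, ne_eq, not_true_eq_false, if_false]
    by_cases hn1 : n ≤ 1
    · -- A's range(1, n) is empty for n ≤ 1, so A returns true; B returns true.
      have hempty : PySem.List.pyRange 1 n 1 = [] := by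
        rw [PySem.List.pyRange_one]
        have : (n - 1).toNat = 0 := by omega
        simp [this]
      simp [hempty, hn1]
    · rw [not_le] at hn1
      have hnpos : 0 < n := by omega
      set m : Nat := n.toNat with hm
      have hmn : (m : Int) = n := Int.toNat_of_nonneg (by omega)
      have hm2 : 2 ≤ m := by omega
      have hdvd : n ∣ l := (PySem.Int.mod_eq_zero_iff_dvd l n).mp hmod
      have hdvdN : m ∣ xs.length := by
        rcases hdvd with ⟨k, hk⟩
        have hl0 : (0 : Int) ≤ l := by rw [hl]; positivity
        have hk0 : 0 ≤ k := by nlinarith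
        refine ⟨k.toNat, ?_⟩
        have hcast : ((m * k.toNat : Nat) : Int) = (xs.length : Int) := by
          push_cast
          rw [Int.toNat_of_nonneg hk0, hmn, ← hk, hl]
        exact_mod_cast hcast.symm
      set c : Nat := xs.length / m with hc
      have hlen : xs.length = c * m := (Nat.div_mul_cancel hdvdN).symm
      have hchunkT : PySem.Int.truncdiv l n = (c : Int) := by
        rw [← hmn]
        show Int.tdiv l (m : Int) = (c : Int)
        rw [hl, Int.tdiv_eq_ediv_of_nonneg (by positivity), hc, Int.natCast_ediv]
      have hchunkF : PySem.Int.floordiv l n = (c : Int) := by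
        rw [PySem.Int.floordiv_eq_ediv_of_pos hnpos, ← hmn, hl, hc, Int.natCast_ediv]
      rw [hchunkT, hchunkF]
      have hcle : c ≤ xs.length := by rw [hlen]; nlinarith [Nat.zero_le c]
      set p := PySem.List.slice xs none (some (c : Int)) with hpdef
      have hpeq : p = xs.take c := by rw [hpdef, PySem.List.slice_to_natCast]
      have hplen : p.length = c := by rw [hpeq, List.length_take]; omega
      have hiff := pv_flatten_replicate_iff c p hplen m xs hlen
      have hB : ¬ n ≤ 1 := by omega
      simp only [hB, if_false]
      rw [PySem.List.pyRange_one]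
      have hnm : (n - 1).toNat = m - 1 := by omega
      rw [hnm]
      rw [Bool.eq_iff_iff]
      simp only [List.all_map, List.all_eq_true, List.mem_range, Function.comp, beq_iff_eq]
      constructor
      · intro hA
        refine hiff.mpr ?_
        intro i hi
        cases i with
        | zero => simp [hpeq]
        | succ j =>
          have hj := hA j (by omega)
          have hji : (1 : Int) + (j : Int) = ((j + 1 : Nat) : Int) := by push_cast; ring
          rw [hji, pv_slice_chunk xs c (j + 1)] at hj
          exact hj.symm
      · intro hB' k hk
        have hkk := hiff.mp hB' (k + 1) (by omega)
        have hji : (1 : Int) + (k : Int) = ((k + 1 : Nat) : Int) := by push_cast; ring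
        rw [hji, pv_slice_chunk xs c (k + 1)]
        exact hkk.symm
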